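-- pv_equiv track=rewrite | github.com/Andreypnfrv/mechanosynthesis | py/kernel/sequences/artifacts.py | classify_artifacts
-- ===== SOURCE A (Python) =====
-- from typing import List, Dict, Any, Tuple
--
-- def classify_artifacts(artifacts: List[Dict[str, Any]]) -> Dict[str, List[Dict[str, Any]]]:
--     """Classify artifacts by type (molecules, atoms, etc.)"""
--     classification = {
--         'atoms': [],
--         'small_molecules': [],
--         'large_fragments': []
--     }
--
--     for artifact in artifacts:
--         if artifact['size'] == 1:
--             classification['atoms'].append(artifact)
--         elif artifact['size'] <= 10:
--             classification['small_molecules'].append(artifact)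
--         else:
--             classification['large_fragments'].append(artifact)
--
--     return classification
-- ===== SOURCE B (Python) =====
-- def classify_artifacts(artifacts):
--     """Classify artifacts by type, building each bucket with its own filtered pass."""
--     return {
--         'atoms': [a for a in artifacts if a['size'] == 1],
--         'small_molecules': [a for a in artifacts if a['size'] != 1 and a['size'] <= 10],
--         'large_fragments': [a for a in artifacts if a['size'] > 10],
--     }
-- ===== Notes on version B (the rewrite author's own statement) =====
-- stated objective: simpler
-- what changed: Replaces the single routing loop with mutable per-bucket appends by three independent filtered passes, one comprehension per bucket.
import Mathlib
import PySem

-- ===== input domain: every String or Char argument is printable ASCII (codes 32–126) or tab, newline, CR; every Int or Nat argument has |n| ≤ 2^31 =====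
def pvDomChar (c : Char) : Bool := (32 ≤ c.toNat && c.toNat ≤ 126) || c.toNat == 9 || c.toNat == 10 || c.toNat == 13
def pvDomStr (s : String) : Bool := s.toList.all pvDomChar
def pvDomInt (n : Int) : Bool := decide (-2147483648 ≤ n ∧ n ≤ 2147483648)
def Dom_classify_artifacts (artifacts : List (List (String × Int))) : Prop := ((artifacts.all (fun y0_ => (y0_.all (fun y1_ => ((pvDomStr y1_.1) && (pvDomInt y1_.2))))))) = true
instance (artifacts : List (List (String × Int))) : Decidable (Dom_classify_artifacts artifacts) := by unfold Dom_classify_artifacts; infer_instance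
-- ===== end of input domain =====

-- B replaces A's single routing loop by three independent filtered passes (simpler decomposition);
-- equivalence is proved on inputs where every artifact has a "size" key (elsewhere Python raises KeyError).

-- artifact['size']: first-match lookup in the association list (inside Pre_ it is always present;
-- the getD default is never reached there)
def pvSize (a : List (String × Int)) : Int := ((a.find? (fun p => p.1 == "size")).map (·.2)).getD 0

-- ===== PORT A =====
-- one pass: route each artifact into one of three accumulated buckets, in order
def classify_artifacts (artifacts : List (List (String × Int))) : List (String × List (List (String × Int))) :=
  let st := artifacts.foldl
    (fun (st : List (List (String × Int)) × List (List (String × Int)) × List (List (String × Int))) a =>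
      if pvSize a == 1 then (st.1 ++ [a], st.2.1, st.2.2)
      else if pvSize a ≤ 10 then (st.1, st.2.1 ++ [a], st.2.2)
      else (st.1, st.2.1, st.2.2 ++ [a]))
    ([], [], [])
  [("atoms", st.1), ("small_molecules", st.2.1), ("large_fragments", st.2.2)]

-- ===== PORT B =====
-- three independent filtered passes, one per bucket
def classify_artifacts_alt (artifacts : List (List (String × Int))) : List (String × List (List (String × Int))) :=
  [("atoms", artifacts.filter (fun a => pvSize a == 1)),
   ("small_molecules", artifacts.filter (fun a => pvSize a != 1 && pvSize a ≤ 10)),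
   ("large_fragments", artifacts.filter (fun a => 10 < pvSize a))]

-- ===== PRECONDITION & SPEC =====
-- Pre_ excludes exactly the inputs where an artifact lacks a "size" key: there Python A raises KeyError.
def Pre_classify_artifacts (artifacts : List (List (String × Int))) : Prop :=
  (artifacts.all (fun a => a.any (fun p => p.1 == "size"))) = true
instance (artifacts : List (List (String × Int))) : Decidable (Pre_classify_artifacts artifacts) := by unfold Pre_classify_artifacts; infer_instance
def pvWitness_classify_artifacts : (List (List (String × Int))) := [[("size", 1)], [("size", 7)], [("size", 42)]]
def Spec_classify_artifacts (artifacts : List (List (String × Int))) (out : List (String × List (List (String × Int)))) : Prop := out = classify_artifacts_alt artifacts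
instance (artifacts : List (List (String × Int))) (out : List (String × List (List (String × Int)))) : Decidable (Spec_classify_artifacts artifacts out) := by unfold Spec_classify_artifacts; infer_instance

-- ===== CLAIM (what is proved, stated in full; the proofs are below) =====
def Claim_equal_classify_artifacts : Prop := ∀ (artifacts : List (List (String × Int))), Dom_classify_artifacts artifacts → Pre_classify_artifacts artifacts → Spec_classify_artifacts artifacts (classify_artifacts artifacts)

-- ===== LEMMAS AND PROOFS =====

-- loop invariant: the fold extends each accumulator by the corresponding filter of the remainder
theorem classify_foldl_filter (l : List (List (String × Int)))
    (s1 s2 s3 : List (List (String × Int))) :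
    l.foldl
      (fun (st : List (List (String × Int)) × List (List (String × Int)) × List (List (String × Int))) a =>
        if pvSize a == 1 then (st.1 ++ [a], st.2.1, st.2.2)
        else if pvSize a ≤ 10 then (st.1, st.2.1 ++ [a], st.2.2)
        else (st.1, st.2.1, st.2.2 ++ [a]))
      (s1, s2, s3)
    = (s1 ++ l.filter (fun a => pvSize a == 1),
       s2 ++ l.filter (fun a => pvSize a != 1 && pvSize a ≤ 10),
       s3 ++ l.filter (fun a => 10 < pvSize a)) := by
  induction l generalizing s1 s2 s3 with
  | nil => simp
  | cons a t ih =>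
    rw [List.foldl_cons]
    by_cases h1 : pvSize a = 1
    · have hstep : (if pvSize a == 1 then (s1 ++ [a], s2, s3)
          else if pvSize a ≤ 10 then (s1, s2 ++ [a], s3) else (s1, s2, s3 ++ [a]))
          = (s1 ++ [a], s2, s3) := by simp [h1]
      rw [hstep, ih]; simp [h1]
    · by_cases h2 : pvSize a ≤ 10
      · have h3 : ¬ (10 < pvSize a) := by omega
        have hstep : (if pvSize a == 1 then (s1 ++ [a], s2, s3)
            else if pvSize a ≤ 10 then (s1, s2 ++ [a], s3) else (s1, s2, s3 ++ [a]))
            = (s1, s2 ++ [a], s3) := by simp [h1, h2]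
        rw [hstep, ih]; simp [h1, h2, h3]
      · have h3 : 10 < pvSize a := by omega
        have hstep : (if pvSize a == 1 then (s1 ++ [a], s2, s3)
            else if pvSize a ≤ 10 then (s1, s2 ++ [a], s3) else (s1, s2, s3 ++ [a]))
            = (s1, s2, s3 ++ [a]) := by simp [h1, h2]
        rw [hstep, ih]; simp [h1, h2, h3]

-- ===== VERDICT (by name: the statement is the Claim_ definition above) =====
theorem classify_artifacts_spec : Claim_equal_classify_artifacts := by
  intro artifacts _ _
  unfold Spec_classify_artifacts classify_artifacts classify_artifacts_alt
  rw [classify_foldl_filter]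
  simp
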